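-- pv_equiv track=rewrite | github.com/ESMAP-World-Bank-Group/EPM | epm/postprocessing/data_inception_report/pipeline.py | _order_availability_periods
-- ===== SOURCE A (Python) =====
-- from typing import Dict, Iterable, List, Optional, Tuple, Union
--
-- def _normalize_column_label(label: str) -> str:
--     """Return a lowercased, trimmed column label without BOM artifacts."""
--
--     return str(label).replace("\ufeff", "").strip().lower()
--
-- def _order_availability_periods(columns: Iterable[str]) -> List[str]:
--     """Order availability columns by numeric suffix when possible (e.g., m1..m12)."""
--
--     unique_cols = list(dict.fromkeys([str(col) for col in columns]))
--
--     def _sort_key(label: str) -> Tuple[int, Union[int, str]]: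
--         normalized = _normalize_column_label(label)
--         digits = "".join(ch for ch in normalized if ch.isdigit())
--         if digits.isdigit():
--             return (0, int(digits))
--         return (1, normalized)
--
--     return sorted(unique_cols, key=_sort_key)
-- ===== SOURCE B (Python) =====
-- from typing import Iterable, List
--
-- def _normalize_column_label(label: str) -> str:
--     return str(label).replace("\ufeff", "").strip().lower()
--
-- def _numeric_suffix(label: str):
--     digits = "".join(ch for ch in _normalize_column_label(label) if ch.isdigit())
--     return int(digits) if digits.isdigit() else None
--
-- def _order_availability_periods(columns: Iterable[str]) -> List[str]:
--     """Order availability columns by numeric suffix when possible (e.g., m1..m12)."""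
--     numeric: List[str] = []
--     other: List[str] = []
--     for label in dict.fromkeys(str(col) for col in columns):
--         if _numeric_suffix(label) is None:
--             other.append(label)
--         else:
--             numeric.append(label)
--     numeric.sort(key=_numeric_suffix)
--     other.sort(key=_normalize_column_label)
--     return numeric + other
-- ===== Notes on version B (the rewrite author's own statement) =====
-- stated objective: alternative
-- what changed: Replaces the single sorted() call with a mixed (group, int-or-str) tuple key by a one-pass partition of the deduplicated columns into numeric and non-numeric lists, each sorted separately by its own single-typed key and concatenated.
import Mathlib
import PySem

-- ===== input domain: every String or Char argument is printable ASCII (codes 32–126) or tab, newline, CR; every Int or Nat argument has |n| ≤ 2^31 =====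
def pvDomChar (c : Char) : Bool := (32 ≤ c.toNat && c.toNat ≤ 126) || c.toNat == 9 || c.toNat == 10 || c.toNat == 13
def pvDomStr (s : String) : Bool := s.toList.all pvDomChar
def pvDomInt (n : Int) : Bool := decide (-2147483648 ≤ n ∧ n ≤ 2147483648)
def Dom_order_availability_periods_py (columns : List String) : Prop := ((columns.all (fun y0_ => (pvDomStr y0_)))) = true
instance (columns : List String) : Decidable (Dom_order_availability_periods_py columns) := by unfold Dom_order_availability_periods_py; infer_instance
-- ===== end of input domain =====

-- B partitions the deduplicated columns into numeric and non-numeric labels and sorts each group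
-- by its own single-typed key, instead of A's single sort with a mixed tuple key (objective: alternative).

-- ===== PORT A =====
-- _normalize_column_label: str(label).replace("\ufeff", "").strip().lower()
def normalizeLabel (label : String) : String :=
  PySem.Str.lower (PySem.Str.strip (PySem.Str.replace label "\uFEFF" ""))

-- "".join(ch for ch in s if ch.isdigit())
def digitsOf (s : String) : String :=
  String.ofList (s.toList.filter PySem.Chars.isdigit)

-- _sort_key, with the tuple (0, int(digits)) / (1, normalized) encoded as a triple
-- (group, int-part, str-part); the fillers "" and 0 never decide a comparison because the
-- group component differs whenever the live parts have different types.
def sortKeyA (label : String) : Int × Int × String :=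
  let normalized := normalizeLabel label
  let digits := digitsOf normalized
  if PySem.Str.strIsdigit digits then
    -- int(digits): digits is nonempty and all ASCII digits here, so ofStr? is some; getD is exact
    (0, (PySem.Int.ofStr? digits).getD 0, "")
  else
    (1, 0, normalized)

-- Python's tuple '<' on the keys above (lexicographic; exact on the reachable keys)
def keyLtA (a b : Int × Int × String) : Bool :=
  decide (a.1 < b.1) ||
    (a.1 == b.1 && (decide (a.2.1 < b.2.1) || (a.2.1 == b.2.1 && decide (a.2.2 < b.2.2))))

-- sorted(unique_cols, key=_sort_key) ported as PySem's stable insertion sort expansion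
-- (sorted_eq_foldl_insertBy is rfl) because the tuple key mixes Int and String; the
-- comparator keyLtA ∘ sortKeyA is exactly Python's key comparison.
def order_availability_periods_py (columns : List String) : List String :=
  let unique_cols := PySem.List.dedup (columns.map (fun col => col))
  unique_cols.foldl
    (fun acc x => PySem.List.insertBy (fun a b => keyLtA (sortKeyA a) (sortKeyA b)) x acc) []

-- ===== PORT B =====
-- digits.isdigit() test of Source B's _numeric_suffix (is not None ↔ this is true)
def isNumericCol (label : String) : Bool :=
  PySem.Str.strIsdigit (digitsOf (normalizeLabel label))

-- int(digits) of Source B's _numeric_suffix (only used when isNumericCol holds)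
def numKey (label : String) : Int :=
  (PySem.Int.ofStr? (digitsOf (normalizeLabel label))).getD 0

def order_availability_periods_py_alt (columns : List String) : List String :=
  let part := (PySem.List.dedup (columns.map (fun col => col))).foldl
    (fun acc label =>
      if isNumericCol label then (acc.1 ++ [label], acc.2) else (acc.1, acc.2 ++ [label]))
    ([], [])
  PySem.List.sorted part.1 numKey false ++ PySem.List.sorted part.2 normalizeLabel false

-- ===== PRECONDITION & SPEC =====
def Spec_order_availability_periods_py (columns : List String) (out : List String) : Prop := out = order_availability_periods_py_alt columns
instance (columns : List String) (out : List String) : Decidable (Spec_order_availability_periods_py columns out) := by unfold Spec_order_availability_periods_py; infer_instance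

-- ===== CLAIM (what is proved, stated in full; the proofs are below) =====
def Claim_equal_order_availability_periods_py : Prop := ∀ (columns : List String), Dom_order_availability_periods_py columns → Spec_order_availability_periods_py columns (order_availability_periods_py columns)

-- ===== LEMMAS AND PROOFS =====

-- insertBy passes over a block it never goes before
theorem insertBy_append_of_all_false {α : Type} (c : α → α → Bool) (x : α) (A B : List α)
    (h : ∀ a ∈ A, c x a = false) :
    PySem.List.insertBy c x (A ++ B) = A ++ PySem.List.insertBy c x B := by
  induction A with
  | nil => simp
  | cons a A ih =>
    have ha := h a (by simp)
    simp [PySem.List.insertBy, ha, ih (fun a' ha' => h a' (by simp [ha']))]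

-- insertBy stays inside a block it always goes before the tail of
theorem insertBy_append_of_all_true {α : Type} (c : α → α → Bool) (x : α) (A B : List α)
    (h : ∀ b ∈ B, c x b = true) :
    PySem.List.insertBy c x (A ++ B) = PySem.List.insertBy c x A ++ B := by
  induction A with
  | nil =>
    cases B with
    | nil => simp
    | cons b B =>
      have hb := h b (by simp)
      simp [PySem.List.insertBy, hb]
  | cons a A ih =>
    by_cases hc : c x a = true
    · simp [PySem.List.insertBy, hc]
    · simp only [Bool.not_eq_true] at hc
      simp [PySem.List.insertBy, hc, ih]

-- insertBy only looks at the comparator against list members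
theorem insertBy_congr {α : Type} (c c' : α → α → Bool) (x : α) (ys : List α)
    (h : ∀ y ∈ ys, c x y = c' x y) :
    PySem.List.insertBy c x ys = PySem.List.insertBy c' x ys := by
  induction ys with
  | nil => rfl
  | cons y ys ih =>
    have hy := h y (by simp)
    by_cases hc : c x y = true
    · simp [PySem.List.insertBy, hc, hy ▸ hc]
    · simp only [Bool.not_eq_true] at hc
      simp [PySem.List.insertBy, hc, hy ▸ hc, ih (fun y' hy' => h y' (by simp [hy']))]

-- the comparator on two numeric labels is the Int comparison of numKey
theorem keyLt_num_num {a b : String} (ha : isNumericCol a = true) (hb : isNumericCol b = true) :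
    keyLtA (sortKeyA a) (sortKeyA b) = decide (numKey a < numKey b) := by
  unfold isNumericCol at ha hb
  rw [PySem.Str.strIsdigit_eq] at ha hb
  simp [keyLtA, sortKeyA, ha, hb, numKey]

-- the comparator on two non-numeric labels is the String comparison of normalizeLabel
theorem keyLt_str_str {a b : String} (ha : isNumericCol a = false) (hb : isNumericCol b = false) :
    keyLtA (sortKeyA a) (sortKeyA b) = decide (normalizeLabel a < normalizeLabel b) := by
  unfold isNumericCol at ha hb
  rw [PySem.Str.strIsdigit_eq] at ha hb
  simp [keyLtA, sortKeyA, ha, hb]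

-- a numeric label goes before every non-numeric label
theorem keyLt_num_str {a b : String} (ha : isNumericCol a = true) (hb : isNumericCol b = false) :
    keyLtA (sortKeyA a) (sortKeyA b) = true := by
  unfold isNumericCol at ha hb
  rw [PySem.Str.strIsdigit_eq] at ha hb
  simp [keyLtA, sortKeyA, ha, hb]

-- a non-numeric label never goes before a numeric one
theorem keyLt_str_num {a b : String} (ha : isNumericCol a = false) (hb : isNumericCol b = true) :
    keyLtA (sortKeyA a) (sortKeyA b) = false := by
  unfold isNumericCol at ha hb
  rw [PySem.Str.strIsdigit_eq] at ha hb
  simp [keyLtA, sortKeyA, ha, hb]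

-- A's insertion sort with the tuple comparator splits into the two single-key sorts
theorem foldl_insert_split (xs : List String) :
    xs.foldl (fun acc x => PySem.List.insertBy (fun a b => keyLtA (sortKeyA a) (sortKeyA b)) x acc) []
      = PySem.List.sorted (xs.filter isNumericCol) numKey false
        ++ PySem.List.sorted (xs.filter (fun l => !isNumericCol l)) normalizeLabel false := by
  induction xs using List.reverseRecOn with
  | nil => rfl
  | append_singleton xs x ih =>
    rw [List.foldl_append, List.foldl_cons, List.foldl_nil, ih, List.filter_append,
        List.filter_append]
    by_cases hx : isNumericCol x = true
    · rw [insertBy_append_of_all_true _ _ _ _ (by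
        intro b hb
        rw [PySem.List.mem_sorted] at hb
        exact keyLt_num_str hx (by simpa using (List.mem_filter.mp hb).2)),
        insertBy_congr _ (fun a b => decide (numKey a < numKey b)) _ _ (by
          intro y hy
          rw [PySem.List.mem_sorted] at hy
          exact keyLt_num_num hx (List.mem_filter.mp hy).2)]
      have h1 : List.filter isNumericCol [x] = [x] := by simp [hx]
      have h2 : List.filter (fun l => !isNumericCol l) [x] = [] := by simp [hx]
      rw [h1, h2, List.append_nil,
          PySem.List.sorted_eq_foldl_insertBy (xs.filter isNumericCol ++ [x]) numKey,
          List.foldl_append, List.foldl_cons, List.foldl_nil,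
          ← PySem.List.sorted_eq_foldl_insertBy]
    · simp only [Bool.not_eq_true] at hx
      rw [insertBy_append_of_all_false _ _ _ _ (by
        intro a ha
        rw [PySem.List.mem_sorted] at ha
        exact keyLt_str_num hx (List.mem_filter.mp ha).2),
        insertBy_congr _ (fun a b => decide (normalizeLabel a < normalizeLabel b)) _ _ (by
          intro y hy
          rw [PySem.List.mem_sorted] at hy
          exact keyLt_str_str hx (by simpa using (List.mem_filter.mp hy).2))]
      have h1 : List.filter isNumericCol [x] = [] := by simp [hx]
      have h2 : List.filter (fun l => !isNumericCol l) [x] = [x] := by simp [hx]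
      rw [h1, h2, List.append_nil,
          PySem.List.sorted_eq_foldl_insertBy (xs.filter (fun l => !isNumericCol l) ++ [x])
            normalizeLabel,
          List.foldl_append, List.foldl_cons, List.foldl_nil,
          ← PySem.List.sorted_eq_foldl_insertBy]

-- B's single partition pass is the two filters
theorem foldl_partition (xs : List String) (acc : List String × List String) :
    xs.foldl
      (fun acc label =>
        if isNumericCol label then (acc.1 ++ [label], acc.2) else (acc.1, acc.2 ++ [label])) acc
      = (acc.1 ++ xs.filter isNumericCol, acc.2 ++ xs.filter (fun l => !isNumericCol l)) := by
  induction xs generalizing acc with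
  | nil => simp
  | cons x xs ih =>
    by_cases hx : isNumericCol x = true
    · simp [hx, ih]
    · simp only [Bool.not_eq_true] at hx
      simp [hx, ih]

-- ===== VERDICT (by name: the statement is the Claim_ definition above) =====
theorem order_availability_periods_py_spec : Claim_equal_order_availability_periods_py := by
  intro columns _
  show order_availability_periods_py columns = order_availability_periods_py_alt columns
  unfold order_availability_periods_py order_availability_periods_py_alt
  rw [foldl_insert_split, foldl_partition]
  simp
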